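-- pv_equiv track=rewrite | github.com/moshehaimlevi/repo10 | hw20.py | comb_tup
-- ===== SOURCE A (Python) =====
-- def comb_tup(tup1, tup2) -> tuple:
--     tup3 = list(tup1 + tup2)
--     result = []
--     while tup3:
--         num = tup3[0]
--         count_tup1 = tup1.count(num)
--         count_tup2 = tup2.count(num)
--         result.extend([num] * (count_tup1 + count_tup2))
--         tup3 = [x for x in tup3 if x != num]
--     return tuple(result)
-- ===== SOURCE B (Python) =====
-- def comb_tup(tup1, tup2) -> tuple:
--     # One pass: ordered dict of counts, then expand each distinct value by its count.
--     counts = {}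
--     for x in tup1 + tup2:
--         counts[x] = counts.get(x, 0) + 1
--     out = []
--     for x, c in counts.items():
--         out.extend([x] * c)
--     return tuple(out)
-- ===== Notes on version B (the rewrite author's own statement) =====
-- stated objective: faster
-- what changed: Replaced the repeated count/filter passes over the remaining list with a single pass building an insertion-ordered count dict, then expanding each distinct value by its count.
import Mathlib
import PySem

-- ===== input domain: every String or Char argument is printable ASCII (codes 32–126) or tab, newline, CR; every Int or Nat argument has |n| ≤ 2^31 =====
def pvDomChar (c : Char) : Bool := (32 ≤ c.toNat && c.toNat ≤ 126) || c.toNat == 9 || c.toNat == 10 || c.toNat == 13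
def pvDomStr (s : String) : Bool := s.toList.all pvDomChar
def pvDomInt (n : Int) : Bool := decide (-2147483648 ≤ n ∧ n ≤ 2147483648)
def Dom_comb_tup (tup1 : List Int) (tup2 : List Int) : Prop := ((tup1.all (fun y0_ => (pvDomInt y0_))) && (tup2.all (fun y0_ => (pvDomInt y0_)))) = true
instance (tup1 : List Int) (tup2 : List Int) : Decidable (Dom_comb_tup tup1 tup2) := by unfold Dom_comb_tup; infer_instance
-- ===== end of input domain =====

-- B replaces A's quadratic count/filter loop with a single counting pass over the
-- concatenation (insertion-ordered dict) expanded by counts; measurably faster (asymptotic).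


-- ===== PORT A =====
-- the while loop: take the head, emit it (count in tup1 + count in tup2) times,
-- drop every occurrence of it from tup3, repeat
def combTupLoop (tup1 : List Int) (tup2 : List Int) (tup3 : List Int) : List Int :=
  match tup3 with
  | [] => []
  | num :: rest =>
      PySem.List.pyRepeat [num] ((tup1.count num : Int) + (tup2.count num : Int)) ++
        combTupLoop tup1 tup2 ((num :: rest).filter (fun x => x != num))
termination_by tup3.length
decreasing_by
  simp only [List.filter, bne_self_eq_false, List.length_cons]
  exact Nat.lt_succ_of_le (List.length_filter_le _ _)

def comb_tup (tup1 : List Int) (tup2 : List Int) : List Int :=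
  combTupLoop tup1 tup2 (tup1 ++ tup2)

-- ===== PORT B =====
def comb_tup_alt (tup1 : List Int) (tup2 : List Int) : List Int :=
  let counts := (tup1 ++ tup2).foldl (fun d x => d.insert x (d.getD x 0 + 1)) PySem.Dict.empty
  counts.items.foldl (fun out p => out ++ PySem.List.pyRepeat [p.1] p.2) []

-- ===== PRECONDITION & SPEC =====
def Spec_comb_tup (tup1 : List Int) (tup2 : List Int) (out : List Int) : Prop := out = comb_tup_alt tup1 tup2
instance (tup1 : List Int) (tup2 : List Int) (out : List Int) : Decidable (Spec_comb_tup tup1 tup2 out) := by unfold Spec_comb_tup; infer_instance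

-- ===== CLAIM (what is proved, stated in full; the proofs are below) =====
def Claim_equal_comb_tup : Prop := ∀ (tup1 : List Int) (tup2 : List Int), Dom_comb_tup tup1 tup2 → Spec_comb_tup tup1 tup2 (comb_tup tup1 tup2)

-- ===== LEMMAS AND PROOFS =====

-- folding Set.add over a list ignores elements already in the accumulator
theorem pv_foldl_add_filter {α : Type} [BEq α] [LawfulBEq α] (a : α) :
    ∀ (l : List α) (s : PySem.Set α), a ∈ s →
      List.foldl PySem.Set.add s l = List.foldl PySem.Set.add s (l.filter (fun x => x != a)) := by
  intro l
  induction l with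
  | nil => intro s _; rfl
  | cons x l ih =>
      intro s hs
      by_cases hx : x = a
      · subst hx
        have hstep : PySem.Set.add s x = s := by
          simp [PySem.Set.add, PySem.Set.contains, hs]
        simp [List.filter, List.foldl, hstep, ih s hs]
      · have hmem : a ∈ PySem.Set.add s x := by
          unfold PySem.Set.add
          split <;> simp [hs]
        have hxa : (x != a) = true := by simp [hx]
        simp [List.filter, hxa, List.foldl, ih _ hmem]

-- a head already emitted and absent from the rest stays in front of the fold
theorem pv_foldl_add_cons {α : Type} [BEq α] [LawfulBEq α] (a : α) :
    ∀ (l : List α) (s : PySem.Set α), (∀ x ∈ l, x ≠ a) →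
      List.foldl PySem.Set.add (a :: s) l = a :: List.foldl PySem.Set.add s l := by
  intro l
  induction l with
  | nil => intro s _; rfl
  | cons x l ih =>
      intro s hl
      have hxa : x ≠ a := hl x (by simp)
      have hstep : PySem.Set.add (a :: s) x = a :: PySem.Set.add s x := by
        simp only [PySem.Set.add, PySem.Set.contains, List.contains_cons]
        have : (x == a) = false := by simp [hxa]
        rw [this]
        simp only [Bool.false_or]
        split <;> simp
      simp only [List.foldl, hstep]
      exact ih _ (fun y hy => hl y (by simp [hy]))

theorem pv_ofList_cons_filter (a : Int) (rest : List Int) :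
    PySem.Set.ofList (a :: rest) =
      a :: PySem.Set.ofList (rest.filter (fun x => x != a)) := by
  have h1 : PySem.Set.ofList (a :: rest) = List.foldl PySem.Set.add [a] rest := by
    simp [PySem.Set.ofList, List.foldl, PySem.Set.add, PySem.Set.contains, PySem.Set.empty]
  have h2 := pv_foldl_add_filter a rest ([a] : PySem.Set Int) (by simp)
  have h3 : ∀ x ∈ rest.filter (fun x => x != a), x ≠ a := by
    intro x hx
    have := List.of_mem_filter hx
    simpa using this
  have h4 := pv_foldl_add_cons a (rest.filter (fun x => x != a)) ([] : PySem.Set Int) h3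
  rw [h1, h2]
  exact h4

-- A's loop produces, for each distinct element of tup3 in first-appearance order,
-- that element repeated (count in tup1 + count in tup2) times
theorem pv_combTupLoop_eq (tup1 tup2 : List Int) :
    ∀ (t3 : List Int),
      combTupLoop tup1 tup2 t3 =
        (PySem.Set.ofList t3).flatMap
          (fun k => List.replicate (tup1.count k + tup2.count k) k) := by
  intro t3
  induction t3 using combTupLoop.induct with
  | case1 => simp [combTupLoop, PySem.Set.ofList, PySem.Set.empty]
  | case2 num rest ih =>
      rw [combTupLoop, pv_ofList_cons_filter num rest]
      have hfilter : (num :: rest).filter (fun x => x != num) =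
          rest.filter (fun x => x != num) := by
        simp [List.filter]
      rw [hfilter] at ih ⊢
      rw [ih]
      simp [PySem.List.pyRepeat_singleton, List.flatMap_cons]
      omega

-- VERDICT helper: both sides equal the canonical grouped form
theorem pv_both_canonical (tup1 tup2 : List Int) :
    comb_tup tup1 tup2 = comb_tup_alt tup1 tup2 := by
  unfold comb_tup comb_tup_alt
  rw [PySem.Dict.foldl_insert_getD_add_one_eq_counter,
      PySem.List.foldl_append_eq_flatMap, PySem.Dict.items_counter,
      List.flatMap_map, pv_combTupLoop_eq]
  simp only [List.nil_append]
  apply List.flatMap_congr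
  intro k _
  rw [PySem.List.pyRepeat_singleton, List.count_append]
  congr 1

-- ===== VERDICT (by name: the statement is the Claim_ definition above) =====
theorem comb_tup_spec : Claim_equal_comb_tup := by
  intro tup1 tup2 _
  unfold Spec_comb_tup
  exact pv_both_canonical tup1 tup2
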